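-- pv_equiv track=rewrite | github.com/compiler-testing/Fuzzer | fuzz_tool/src/fuzz/directed.py | fixlowerpass
-- ===== SOURCE A (Python) =====
-- def fixlowerpass(singlePass):
--     # singlePass = "-pass-pipeline=\"builtin.module(func.func(tosa-to-linalg-named,tosa-to-linalg))\" -test-linalg-elementwise-fusion-patterns=fuse-generic-ops-control -test-vector-transferop-opt -mlir-print-ir-module-scope -sparse-compiler=\"enable-index-optimizations=true\" -view-op-graph=\"print-data-flow-edges=true\""
--     newpass = []
--     passlist = str_to_list(singlePass)
--     if len(passlist) == 1:   #singlePass只有一个pass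
--         newpass.append(singlePass)
--     else:
--         passlist = list(filter(lambda x: x != '', passlist))
--         locs = []
--         for i, x in enumerate(passlist):
--             if x.find("-pass-pipeline") >= 0:
--                 locs.append(i) #保存所有-pass-pipeline的位置
--
--         if len(locs) == 0:
--             newpass.append(singlePass)
--         else:
--             l = locs[0]
--             if l == 0:
--                 newpass.append(passlist[0])
--             else:
--                 newpass.append(' '.join(passlist[0:l]))
--                 newpass.append(passlist[l])
--             if (len(locs) == 1 and l!=len(passlist)-1):
--                 newpass.append(' '.join(passlist[l + 1:]))
--             else:
--                 for i in locs[1:]: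
--                     if (i - l > 1):
--                         newpass.append(' '.join(passlist[l + 1:i]))
--                     newpass.append(passlist[i])
--                     if i == locs[-1]:
--                         if i != len(passlist) - 1:
--                             newpass.append(' '.join(passlist[i + 1:]))
--                     l = i
--     #log.info(newpass)
--     return newpass
--
-- def str_to_list(content: str) -> list:
--     list = content.split(' ')
--     return list
-- ===== SOURCE B (Python) =====
-- def fixlowerpass(singlePass):
--     # Streaming pass with a buffer instead of building a locs index and doing sliced joins.
--     parts = singlePass.split(' ')
--     if len(parts) == 1:
--         return [singlePass]
--     toks = [t for t in parts if t != '']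
--     if not any("-pass-pipeline" in t for t in toks):
--         return [singlePass]
--     out = []
--     buf = []
--     for t in toks:
--         if "-pass-pipeline" in t:
--             if buf:
--                 out.append(' '.join(buf))
--                 buf = []
--             out.append(t)
--         else:
--             buf.append(t)
--     if buf:
--         out.append(' '.join(buf))
--     return out
-- ===== Notes on version B (the rewrite author's own statement) =====
-- stated objective: simpler
-- what changed: Replaces A's marker-index list (locs) plus slice-and-join bookkeeping over absolute positions with a single streaming pass that keeps a buffer of non-marker tokens and flushes it at each marker and at the end.
import Mathlib
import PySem

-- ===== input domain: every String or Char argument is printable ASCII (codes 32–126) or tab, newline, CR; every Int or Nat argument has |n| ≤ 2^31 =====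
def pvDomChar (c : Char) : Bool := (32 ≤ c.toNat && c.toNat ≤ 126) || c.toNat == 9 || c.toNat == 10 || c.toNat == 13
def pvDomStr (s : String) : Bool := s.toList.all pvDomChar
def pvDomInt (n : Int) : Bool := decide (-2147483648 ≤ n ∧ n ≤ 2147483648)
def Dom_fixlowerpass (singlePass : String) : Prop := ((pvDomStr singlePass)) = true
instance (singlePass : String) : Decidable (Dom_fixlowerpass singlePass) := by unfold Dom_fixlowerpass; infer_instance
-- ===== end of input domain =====

-- B replaces A's marker-index list (locs) + slice/join bookkeeping with one streaming pass
-- over the tokens that keeps a buffer and flushes it at each marker token (objective: simpler).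


-- ===== PORT A =====
-- transliteration of A; '.split(' ')' is PySem.Str.split? with the non-empty separator " "
-- (always `some`, so `.getD []` is exact), 'x.find(sub) >= 0' kept literally, locs built by
-- the enumerate fold, groups by slice-and-join over absolute indices.
def fixlowerpass (singlePass : String) : List String :=
  let passlist := (PySem.Str.split? singlePass " ").getD []
  if passlist.length = 1 then [singlePass]
  else
    let passlist := passlist.filter (fun x => x ≠ "")
    let locs := (PySem.List.enumerate passlist).foldl
      (fun acc p => if PySem.Str.find p.2 "-pass-pipeline" ≥ 0 then acc ++ [p.1] else acc)
      ([] : List Int)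
    match locs with
    | [] => [singlePass]
    | l :: lr =>
      let n : Int := passlist.length
      let head :=
        if l = 0 then [(PySem.List.pyGet? passlist l).getD ""]
        else [PySem.Str.join " " (PySem.List.slice passlist (some 0) (some l)),
              (PySem.List.pyGet? passlist l).getD ""]
      let tl :=
        if lr = [] ∧ l ≠ n - 1 then
          [PySem.Str.join " " (PySem.List.slice passlist (some (l + 1)) none)]
        else
          (lr.foldl (fun (st : Int × List String) i =>
              let acc1 := if i - st.1 > 1 then
                  st.2 ++ [PySem.Str.join " " (PySem.List.slice passlist (some (st.1 + 1)) (some i))]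
                else st.2
              let acc2 := acc1 ++ [(PySem.List.pyGet? passlist i).getD ""]
              let acc3 := if i = (l :: lr).getLast (List.cons_ne_nil _ _) ∧ i ≠ n - 1 then
                  acc2 ++ [PySem.Str.join " " (PySem.List.slice passlist (some (i + 1)) none)]
                else acc2
              (i, acc3)) (l, ([] : List String))).2
      head ++ tl

-- ===== PORT B =====
-- the streaming loop of Source B: buffer of non-marker tokens, flushed at each marker and at the end
def pvGroup (buf : List String) : List String → List String
  | [] => if buf = [] then [] else [PySem.Str.join " " buf]
  | t :: ts =>
    if PySem.Str.isIn "-pass-pipeline" t then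
      (if buf = [] then [] else [PySem.Str.join " " buf]) ++ t :: pvGroup [] ts
    else pvGroup (buf ++ [t]) ts

def fixlowerpass_alt (singlePass : String) : List String :=
  let parts := (PySem.Str.split? singlePass " ").getD []
  if parts.length = 1 then [singlePass]
  else
    let toks := parts.filter (fun t => t ≠ "")
    if !(toks.any (fun t => PySem.Str.isIn "-pass-pipeline" t)) then [singlePass]
    else pvGroup [] toks

-- ===== PRECONDITION & SPEC =====
def Spec_fixlowerpass (singlePass : String) (out : List String) : Prop := out = fixlowerpass_alt singlePass
instance (singlePass : String) (out : List String) : Decidable (Spec_fixlowerpass singlePass out) := by unfold Spec_fixlowerpass; infer_instance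

-- ===== CLAIM (what is proved, stated in full; the proofs are below) =====
def Claim_equal_fixlowerpass : Prop := ∀ (singlePass : String), Dom_fixlowerpass singlePass → Spec_fixlowerpass singlePass (fixlowerpass singlePass)

-- ===== LEMMAS AND PROOFS =====

def pvMarker (t : String) : Bool := PySem.Str.isIn "-pass-pipeline" t

def pvIdxs (k : Nat) : List String → List Nat
  | [] => []
  | t :: ts => if pvMarker t then k :: pvIdxs (k + 1) ts else pvIdxs (k + 1) ts

theorem pv_marker_find_iff (t : String) :
    (PySem.Str.find t "-pass-pipeline" ≥ 0) ↔ pvMarker t = true := by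
  rw [ge_iff_le, PySem.Str.find_nonneg_iff, pvMarker]
  exact (PySem.Str.isIn_iff_infix _ _).symm

theorem pv_idxs_ge : ∀ (ts : List String) (k j : Nat), j ∈ pvIdxs k ts → k ≤ j := by
  intro ts
  induction ts with
  | nil => intro k j h; simp [pvIdxs] at h
  | cons t ts ih =>
    intro k j h
    simp only [pvIdxs] at h
    split at h
    · rcases List.mem_cons.1 h with rfl | h
      · exact Nat.le_refl _
      · exact Nat.le_of_succ_le (ih (k + 1) j h)
    · exact Nat.le_of_succ_le (ih (k + 1) j h)

theorem pv_idxs_nil_iff (ts : List String) (k : Nat) :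
    pvIdxs k ts = [] ↔ ∀ t ∈ ts, pvMarker t = false := by
  induction ts generalizing k with
  | nil => simp [pvIdxs]
  | cons t ts ih =>
    simp only [pvIdxs]
    cases hm : pvMarker t with
    | true => simp [hm]
    | false => simp [hm, ih]

theorem pv_idxs_pairwise : ∀ (ts : List String) (k : Nat), (pvIdxs k ts).Pairwise (· < ·) := by
  intro ts
  induction ts with
  | nil => intro k; simp [pvIdxs]
  | cons t ts ih =>
    intro k
    simp only [pvIdxs]
    split
    · exact List.Pairwise.cons (fun j hj => Nat.lt_of_succ_le (pv_idxs_ge ts (k + 1) j hj)) (ih (k + 1))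
    · exact ih (k + 1)

theorem pv_enum_fold : ∀ (ts : List String) (k : Nat) (acc : List Int),
    (PySem.List.enumerate ts (k : Int)).foldl
      (fun acc p => if PySem.Str.find p.2 "-pass-pipeline" ≥ 0 then acc ++ [p.1] else acc) acc
    = acc ++ (pvIdxs k ts).map (fun (j : Nat) => (j : Int)) := by
  intro ts
  induction ts with
  | nil => intro k acc; simp [PySem.List.enumerate, pvIdxs]
  | cons t ts ih =>
    intro k acc
    rw [PySem.List.enumerate_cons]
    simp only [List.foldl_cons]
    have hc : ((k : Int) + 1) = ((k + 1 : Nat) : Int) := by push_cast; ring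
    cases hm : pvMarker t with
    | true =>
      rw [if_pos ((pv_marker_find_iff t).2 hm), hc, ih]
      simp [pvIdxs, hm]
    | false =>
      rw [if_neg (fun h => by simp [(pv_marker_find_iff t).1 h] at hm), hc, ih]
      simp [pvIdxs, hm]

theorem pv_idxs_decomp : ∀ (ts : List String) (k j : Nat) (js : List Nat),
    pvIdxs k ts = j :: js →
    ∃ seg m ts', ts = seg ++ m :: ts' ∧ seg.length = j - k ∧ k ≤ j ∧
      (∀ t ∈ seg, pvMarker t = false) ∧ pvMarker m = true ∧ js = pvIdxs (j + 1) ts' := by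
  intro ts
  induction ts with
  | nil => intro k j js h; simp [pvIdxs] at h
  | cons t ts ih =>
    intro k j js h
    simp only [pvIdxs] at h
    split at h
    · rcases h with ⟨rfl, rfl⟩
      exact ⟨[], t, ts, rfl, by simp, Nat.le_refl _, by simp, by assumption, rfl⟩
    · obtain ⟨seg, m, ts', h1, h2, h3, h4, h5, h6⟩ := ih (k + 1) j js h
      refine ⟨t :: seg, m, ts', by rw [h1, List.cons_append], ?_, by omega, ?_, h5, h6⟩
      · simp only [List.length_cons, h2]; omega
      · intro u hu
        rcases List.mem_cons.1 hu with rfl | hu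
        · rename_i hneg; simpa [pvMarker] using hneg
        · exact h4 u hu

theorem pv_group_prefix : ∀ (seg : List String) (buf ts : List String),
    (∀ t ∈ seg, pvMarker t = false) → pvGroup buf (seg ++ ts) = pvGroup (buf ++ seg) ts := by
  intro seg
  induction seg with
  | nil => intro buf ts _; simp
  | cons t seg ih =>
    intro buf ts h
    have ht : PySem.Str.isIn "-pass-pipeline" t = false := h t (List.mem_cons_self ..)
    simp only [List.cons_append, pvGroup, ht, Bool.false_eq_true, if_false]
    rw [ih (buf ++ [t]) ts (fun u hu => h u (List.mem_cons_of_mem _ hu))]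
    simp

theorem pv_group_marker (buf : List String) (m : String) (ts : List String)
    (hm : pvMarker m = true) :
    pvGroup buf (m :: ts) = (if buf = [] then [] else [PySem.Str.join " " buf]) ++ m :: pvGroup [] ts := by
  have hm' : PySem.Str.isIn "-pass-pipeline" m = true := hm
  simp only [pvGroup, hm', if_true]

def pvTailN (pl : List String) (l : Nat) : List Nat → List String
  | [] => []
  | j :: js =>
    (if l + 1 < j then [PySem.Str.join " " ((pl.drop (l + 1)).take (j - (l + 1)))] else [])
    ++ [(pl[j]?).getD ""]
    ++ (if js = [] ∧ j ≠ pl.length - 1 then [PySem.Str.join " " (pl.drop (j + 1))] else [])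
    ++ pvTailN pl j js

theorem pv_fold_eq (pl : List String) (lastI : Int) (hpl : 0 < pl.length) :
    ∀ (js : List Nat) (l : Nat) (acc : List String),
    js.Pairwise (· < ·) → (∀ h : js ≠ [], ((js.getLast h : Nat) : Int) = lastI) →
    ((js.map (fun (j : Nat) => (j : Int))).foldl (fun (st : Int × List String) i =>
        let acc1 := if i - st.1 > 1 then
            st.2 ++ [PySem.Str.join " " (PySem.List.slice pl (some (st.1 + 1)) (some i))]
          else st.2
        let acc2 := acc1 ++ [(PySem.List.pyGet? pl i).getD ""]
        let acc3 := if i = lastI ∧ i ≠ (pl.length : Int) - 1 then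
            acc2 ++ [PySem.Str.join " " (PySem.List.slice pl (some (i + 1)) none)]
          else acc2
        (i, acc3)) ((l : Int), acc)).2 = acc ++ pvTailN pl l js := by
  intro js
  induction js with
  | nil => intro l acc _ _; simp [pvTailN]
  | cons j js ih =>
    intro l acc hpw hlast
    have e2 : ((l : Int) + 1) = ((l + 1 : Nat) : Int) := by push_cast; ring
    have e3 : ((j : Int) + 1) = ((j + 1 : Nat) : Int) := by push_cast; ring
    simp only [List.map_cons, List.foldl_cons]
    rw [e2, PySem.List.slice_natCast, PySem.List.pyGet?_natCast]
    cases js with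
    | nil =>
      simp only [List.map_nil, List.foldl_nil]
      have hj : ((j : Nat) : Int) = lastI := by simpa using hlast (by simp)
      have hb1 : ((j : Int) - (l : Int) > 1) ↔ (l + 1 < j) := by omega
      have hb2 : (((j : Nat) : Int) = lastI ∧ ((j : Nat) : Int) ≠ ((pl.length : Nat) : Int) - 1) ↔ (j ≠ pl.length - 1) := by
        omega
      rw [if_congr hb1 rfl rfl, if_congr hb2 rfl rfl, e3, PySem.List.slice_from_natCast]
      simp only [pvTailN]
      have htriv : (True ∧ j ≠ pl.length - 1) ↔ (j ≠ pl.length - 1) := by simp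
      rw [if_congr htriv rfl rfl]
      split_ifs <;> simp [List.append_assoc]
    | cons j2 js2 =>
      have hlast' : ∀ h : (j2 :: js2) ≠ [], (((j2 :: js2).getLast h : Nat) : Int) = lastI := by
        intro h
        have h0 := hlast (by simp)
        rwa [List.getLast_cons h] at h0
      have hjne : ¬ (((j : Nat) : Int) = lastI ∧ ((j : Nat) : Int) ≠ ((pl.length : Nat) : Int) - 1) := by
        rintro ⟨hq, -⟩
        have hmem := List.getLast_mem (l := j2 :: js2) (by simp)
        have hlt : j < (j2 :: js2).getLast (by simp) := (List.pairwise_cons.1 hpw).1 _ hmem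
        have h0 := hlast' (by simp)
        omega
      have hb1 : ((j : Int) - (l : Int) > 1) ↔ (l + 1 < j) := by omega
      rw [if_neg hjne, if_congr hb1 rfl rfl,
        ih j _ (List.pairwise_cons.1 hpw).2 hlast']
      simp only [pvTailN]
      have hne2 : ¬ ((j2 :: js2 : List Nat) = [] ∧ j ≠ pl.length - 1) := by simp
      rw [if_neg hne2]
      by_cases hc : l + 1 < j <;> simp [hc, List.append_assoc]

theorem pv_tail_eq (pl : List String) : ∀ (d l : Nat), pl.length - l ≤ d → l < pl.length →
    (match pvIdxs (l + 1) (pl.drop (l + 1)) with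
     | [] => if pl.drop (l + 1) = [] then [] else [PySem.Str.join " " (pl.drop (l + 1))]
     | js => pvTailN pl l js) = pvGroup [] (pl.drop (l + 1)) := by
  intro d
  induction d with
  | zero => intro l hd hl; omega
  | succ d ih =>
    intro l hd hl
    cases hI : pvIdxs (l + 1) (pl.drop (l + 1)) with
    | nil =>
      have hall := (pv_idxs_nil_iff (pl.drop (l + 1)) (l + 1)).1 hI
      have hpre := pv_group_prefix (pl.drop (l + 1)) [] [] hall
      simp only [List.append_nil, List.nil_append] at hpre
      rw [hpre]
      simp [pvGroup]
    | cons j js =>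
      obtain ⟨seg, m, ts', hdec, hlseg, hkj, hsegnm, hm, hjs⟩ :=
        pv_idxs_decomp (pl.drop (l + 1)) (l + 1) j js hI
      have hdl : (pl.drop (l + 1)).length = pl.length - (l + 1) := by simp
      have hlen2 : pl.length - (l + 1) = seg.length + 1 + ts'.length := by
        rw [hdec] at hdl
        simp only [List.length_append, List.length_cons] at hdl
        omega
      have hlplen : l + 1 < pl.length := by omega
      have hjlt : j < pl.length := by omega
      have hts' : pl.drop (j + 1) = ts' := by
        have h1 : pl.drop (j + 1) = (pl.drop (l + 1)).drop (seg.length + 1) := by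
          rw [List.drop_drop]; congr 1; omega
        rw [h1, hdec, show seg ++ m :: ts' = (seg ++ [m]) ++ ts' by simp,
          show seg.length + 1 = (seg ++ [m]).length by simp]
        exact List.drop_left
      have hget : pl[j]? = some m := by
        have h1 : pl[j]? = (pl.drop (l + 1))[j - (l + 1)]? := by
          rw [List.getElem?_drop]; congr 1; omega
        rw [h1, hdec, ← hlseg, List.getElem?_append_right (Nat.le_refl _)]
        simp
      have hseg : (pl.drop (l + 1)).take (j - (l + 1)) = seg := by
        rw [hdec, ← hlseg, List.take_left]
      dsimp only
      rw [hdec, pv_group_prefix seg [] (m :: ts') hsegnm, List.nil_append,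
        pv_group_marker seg m ts' hm]
      simp only [pvTailN, hseg, hget, Option.getD_some]
      have hsegiff : (l + 1 < j) ↔ ¬ (seg = []) := by
        rw [← List.length_eq_zero_iff]; omega
      have htail := ih j (by omega) hjlt
      have hIdx2 : pvIdxs (j + 1) (pl.drop (j + 1)) = js := by rw [hts', ← hjs]
      rw [hIdx2] at htail
      cases js with
      | nil =>
        dsimp only at htail
        rw [hts'] at htail
        have hdropiff : ((([] : List Nat) = []) ∧ j ≠ pl.length - 1) ↔ ¬ (ts' = []) := by
          constructor
          · rintro ⟨-, h⟩ hnil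
            rw [hnil] at hlen2
            simp at hlen2
            omega
          · intro h
            refine ⟨rfl, fun heq => h ?_⟩
            have h5 : ts'.length = 0 := by omega
            exact List.length_eq_zero_iff.1 h5
        rw [hts', ← htail, if_congr hdropiff rfl rfl, if_congr hsegiff rfl rfl]
        simp only [pvTailN, List.append_nil]
        by_cases hs : seg = [] <;> by_cases hd0 : ts' = [] <;> simp [hs, hd0]
      | cons j2 js2 =>
        dsimp only at htail
        rw [hts'] at htail
        have hne2 : ¬ ((j2 :: js2 : List Nat) = [] ∧ j ≠ pl.length - 1) := by simp
        rw [← htail, if_neg hne2, if_congr hsegiff rfl rfl]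
        by_cases hs : seg = [] <;> simp [hs]

-- ===== VERDICT (by name: the statement is the Claim_ definition above) =====
theorem fixlowerpass_spec : Claim_equal_fixlowerpass := by
  intro s _
  show fixlowerpass s = fixlowerpass_alt s
  unfold fixlowerpass fixlowerpass_alt
  dsimp only
  by_cases hlen : ((PySem.Str.split? s " ").getD []).length = 1
  · rw [if_pos hlen, if_pos hlen]
  · rw [if_neg hlen, if_neg hlen]
    set pl := ((PySem.Str.split? s " ").getD []).filter (fun x => x ≠ "") with hpldef
    have hfold := pv_enum_fold pl 0 []
    simp only [Nat.cast_zero, List.nil_append] at hfold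
    rw [hfold]
    cases hI : pvIdxs 0 pl with
    | nil =>
      simp only [List.map_nil]
      have hany : pl.any (fun t => PySem.Str.isIn "-pass-pipeline" t) = false := by
        rw [List.any_eq_false]
        intro t ht
        have := (pv_idxs_nil_iff pl 0).1 hI t ht
        simpa [pvMarker] using this
      rw [hany]
      simp
    | cons j js =>
      obtain ⟨seg, m, ts', hdec, hlseg0, hkj, hsegnm, hm, hjs⟩ := pv_idxs_decomp pl 0 j js hI
      have hlseg : seg.length = j := by omega
      have hlenpl : pl.length = seg.length + 1 + ts'.length := by
        rw [hdec]; simp only [List.length_append, List.length_cons]; omega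
      have hplpos : 0 < pl.length := by omega
      have hjlt : j < pl.length := by omega
      have hlen3 : pl.length = j + 1 + ts'.length := by omega
      have hts' : pl.drop (j + 1) = ts' := by
        rw [hdec, show seg ++ m :: ts' = (seg ++ [m]) ++ ts' by simp,
          show j + 1 = (seg ++ [m]).length by simp [hlseg]]
        exact List.drop_left
      have htake : pl.take j = seg := by rw [hdec, ← hlseg, List.take_left]
      have hget : pl[j]? = some m := by
        rw [hdec, ← hlseg, List.getElem?_append_right (Nat.le_refl _)]
        simp
      have hany : pl.any (fun t => PySem.Str.isIn "-pass-pipeline" t) = true := by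
        rw [List.any_eq_true]
        exact ⟨m, by rw [hdec]; simp, hm⟩
      rw [hany]
      simp only [List.map_cons, Bool.not_true, Bool.false_eq_true, if_false]
      rw [hdec, pv_group_prefix seg [] (m :: ts') hsegnm, List.nil_append,
        pv_group_marker seg m ts' hm, ← hdec]
      have hc0 : (((j : Nat) : Int) = 0) ↔ (seg = []) := by
        rw [← List.length_eq_zero_iff]; omega
      simp only [PySem.List.pyGet?_natCast, hget, Option.getD_some,
        PySem.List.slice_zero_start, PySem.List.slice_to_natCast, htake]
      rw [if_congr hc0 rfl rfl]
      have htail := pv_tail_eq pl pl.length j (by omega) hjlt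
      have hIdx2 : pvIdxs (j + 1) (pl.drop (j + 1)) = js := by rw [hts', ← hjs]
      rw [hIdx2] at htail
      have e3 : ((j : Int) + 1) = ((j + 1 : Nat) : Int) := by push_cast; ring
      cases js with
      | nil =>
        dsimp only at htail
        rw [hts'] at htail
        simp only [List.map_nil, List.foldl_nil]
        rw [e3, PySem.List.slice_from_natCast, hts', ← htail]
        have hdi : (True ∧ ((j : Nat) : Int) ≠ ((pl.length : Nat) : Int) - 1) ↔ ¬ (ts' = []) := by
          constructor
          · rintro ⟨-, h⟩ hnil
            rw [hnil] at hlen3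
            simp at hlen3
            omega
          · intro h
            refine ⟨trivial, fun heq => h ?_⟩
            have h5 : ts'.length = 0 := by omega
            exact List.length_eq_zero_iff.1 h5
        rw [if_congr hdi rfl rfl]
        by_cases hs : seg = [] <;> by_cases ht0 : ts' = [] <;> simp [hs, ht0]
      | cons j2 js2 =>
        dsimp only at htail
        have hpw := pv_idxs_pairwise pl 0
        rw [hI] at hpw
        have hlastdef : ∀ h : (j2 :: js2) ≠ [],
            (((j2 :: js2).getLast h : Nat) : Int)
              = ((j : Int) :: (j2 :: js2).map (fun (j : Nat) => (j : Int))).getLast (List.cons_ne_nil _ _) := by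
          intro h
          have hgl : ∀ (L M : List Int) (hL : L ≠ []) (hM : M ≠ []), L = M → L.getLast hL = M.getLast hM := by
            intro L M hL hM he; subst he; rfl
          rw [hgl ((j : Int) :: (j2 :: js2).map (fun (j : Nat) => (j : Int)))
               ((j :: j2 :: js2).map (fun (j : Nat) => (j : Int)))
               (List.cons_ne_nil _ _) (by simp) (by simp), List.getLast_map]
          exact congrArg _ (List.getLast_cons h).symm
        have hcondne : ¬ ((j2 :: js2).map (fun (j : Nat) => (j : Int)) = [] ∧ ((j : Nat) : Int) ≠ ((pl.length : Nat) : Int) - 1) := by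
          rintro ⟨h1, -⟩; simp at h1
        rw [if_neg hcondne,
          pv_fold_eq pl _ hplpos (j2 :: js2) j [] (List.pairwise_cons.1 hpw).2 hlastdef,
          List.nil_append, htail, hts']
        by_cases hs : seg = [] <;> simp [hs]
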